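-- pv_equiv track=rewrite | github.com/glowfi/DS | Programs/5_Recursion/30_Count_Permutation.py | countPermutation_II
-- ===== SOURCE A (Python) =====
-- def countPermutation_II(idx, proc, s) -> int:
--     if idx == len(s):
--         return 1
--
--     count = 0
--     for i in range(len(proc) + 1):
--         newString = proc[:i] + s[idx] + proc[i:]
--         count += countPermutation_II(idx + 1, newString, s)
--
--     return count
-- ===== SOURCE B (Python) =====
-- def countPermutation_II(idx, proc, s) -> int:
--     # closed form: inserting each remaining char of s into proc multiplies the
--     # count by the current length + 1, independent of the characters themselves
--     res = 1
--     for j in range(1, len(s) - idx + 1):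
--         res *= len(proc) + j
--     return res
-- ===== Notes on version B (the rewrite author's own statement) =====
-- stated objective: faster
-- what changed: replaces the factorial-size insertion recursion by the closed-form rising-factorial product prod_{j=1}^{len(s)-idx} (len(proc)+j) in one linear loop; intended as asymptotically faster (a timing run saw A time out already at n=16 where B returned, so no ratio at the largest size could be confirmed)
import Mathlib
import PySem

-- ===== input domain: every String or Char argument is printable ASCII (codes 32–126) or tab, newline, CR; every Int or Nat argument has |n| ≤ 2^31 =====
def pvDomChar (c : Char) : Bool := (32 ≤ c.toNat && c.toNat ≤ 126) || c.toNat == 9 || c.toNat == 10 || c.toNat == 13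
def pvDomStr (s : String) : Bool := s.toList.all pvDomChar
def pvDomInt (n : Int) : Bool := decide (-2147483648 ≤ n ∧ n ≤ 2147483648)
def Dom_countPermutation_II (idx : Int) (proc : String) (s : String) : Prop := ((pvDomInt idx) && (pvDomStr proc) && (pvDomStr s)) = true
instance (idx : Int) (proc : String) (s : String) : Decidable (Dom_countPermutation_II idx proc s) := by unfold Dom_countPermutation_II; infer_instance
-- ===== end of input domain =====

-- B replaces A's factorial-size insertion recursion by the closed-form rising-factorial
-- product prod_{j=1}^{len(s)-idx} (len(proc)+j) in one linear loop; intended as faster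
-- (a timing run saw A time out already at n=16 where B returned instantly, so no
-- ratio at the largest size could be confirmed).

-- ===== PORT A =====
-- A's recursion on idx with step idx+1 is ported with an explicit Nat measure
-- ((len s - idx).toNat), which counts exactly the remaining recursion depth;
-- when s[idx] would raise IndexError (pyGet? = none) the port returns 0 — outside Pre_.
def cpAGo (fuel : Nat) (idx : Int) (proc : List Char) (s : List Char) : Int :=
  if idx = (s.length : Int) then 1
  else
    match PySem.List.pyGet? s idx, fuel with
    | none, _ => 0          -- Python raises IndexError here (excluded by Pre_)
    | some _, 0 => 0        -- unreachable when fuel = (len s - idx).toNat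
    | some c, f + 1 =>
      (PySem.List.pyRange 0 ((proc.length : Int) + 1) 1).foldl
        (fun count i =>
          count + cpAGo f (idx + 1)
            (PySem.List.slice proc none (some i) ++ [c] ++ PySem.List.slice proc (some i) none) s) 0

def countPermutation_II (idx : Int) (proc : String) (s : String) : Int :=
  cpAGo ((s.toList.length - idx).toNat) idx proc.toList s.toList

-- ===== PORT B =====
def countPermutation_II_alt (idx : Int) (proc : String) (s : String) : Int :=
  (PySem.List.pyRange 1 ((s.toList.length : Int) - idx + 1) 1).foldl
    (fun res j => res * ((proc.toList.length : Int) + j)) 1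

-- ===== PRECONDITION & SPEC =====
-- Pre_ excludes exactly the inputs where A raises IndexError on s[idx]:
-- idx > len(s) or idx < -len(s) (A returns normally everywhere else, including
-- negative in-range idx via Python's wraparound).
def Pre_countPermutation_II (idx : Int) (proc : String) (s : String) : Prop :=
  -(s.toList.length : Int) ≤ idx ∧ idx ≤ (s.toList.length : Int)
instance (idx : Int) (proc : String) (s : String) : Decidable (Pre_countPermutation_II idx proc s) := by
  unfold Pre_countPermutation_II; infer_instance

def pvWitness_countPermutation_II : Int × String × String := (0, "ab", "xy")

def Spec_countPermutation_II (idx : Int) (proc : String) (s : String) (out : Int) : Prop := out = countPermutation_II_alt idx proc s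
instance (idx : Int) (proc : String) (s : String) (out : Int) : Decidable (Spec_countPermutation_II idx proc s out) := by unfold Spec_countPermutation_II; infer_instance

-- ===== CLAIM (what is proved, stated in full; the proofs are below) =====
def Claim_equal_countPermutation_II : Prop := ∀ (idx : Int) (proc : String) (s : String), Dom_countPermutation_II idx proc s → Pre_countPermutation_II idx proc s → Spec_countPermutation_II idx proc s (countPermutation_II idx proc s)

-- ===== LEMMAS AND PROOFS =====

-- the common value: F k lp = (lp+1)(lp+2)⋯(lp+k)
def cpF : Nat → Int → Int
  | 0, _ => 1
  | k + 1, lp => (lp + 1) * cpF k (lp + 1)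

theorem cpF_succ_right (k : Nat) (lp : Int) : cpF (k + 1) lp = cpF k lp * (lp + k + 1) := by
  induction k generalizing lp with
  | zero => simp [cpF]
  | succ k ih =>
    show (lp + 1) * cpF (k + 1) (lp + 1) = (lp + 1) * cpF k (lp + 1) * (lp + (k + 1) + 1)
    rw [ih]; ring

theorem cpAGo_eq_cpF (k : Nat) (idx : Int) (proc s : List Char)
    (hk : (s.length : Int) - idx = k) (hge : -(s.length : Int) ≤ idx) :
    cpAGo k idx proc s = cpF k (proc.length : Int) := by
  induction k generalizing idx proc with
  | zero =>
    have : idx = (s.length : Int) := by omega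
    simp [cpAGo, this, cpF]
  | succ k ih =>
    have hlt : idx < (s.length : Int) := by omega
    have hne : idx ≠ (s.length : Int) := by omega
    have hin : PySem.Raise.InRange s.length idx := by
      simp [PySem.Raise.InRange]; omega
    obtain ⟨c, hc⟩ : ∃ c, PySem.List.pyGet? s idx = some c := by
      cases h : PySem.List.pyGet? s idx with
      | none => exact absurd ((PySem.List.pyGet?_eq_none_iff s idx).mp h) (by simpa using hin)
      | some c => exact ⟨c, rfl⟩
    rw [cpAGo.eq_def, if_neg hne, hc]
    show (PySem.List.pyRange 0 ((proc.length : Int) + 1) 1).foldl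
        (fun count i =>
          count + cpAGo k (idx + 1)
            (PySem.List.slice proc none (some i) ++ [c] ++ PySem.List.slice proc (some i) none) s) 0
      = cpF (k + 1) (proc.length : Int)
    have hlen : ∀ i ∈ PySem.List.pyRange 0 ((proc.length : Int) + 1) 1,
        (PySem.List.slice proc none (some i) ++ [c] ++ PySem.List.slice proc (some i) none).length
          = proc.length + 1 := by
      intro i hi
      rw [PySem.List.mem_pyRange_one] at hi
      rw [PySem.List.slice_to proc hi.1, PySem.List.slice_from proc hi.1]
      simp only [List.length_append, List.length_take, List.length_drop,
        List.length_cons, List.length_nil]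
      omega
    have hbody : ∀ (acc : Int), ∀ i ∈ PySem.List.pyRange 0 ((proc.length : Int) + 1) 1,
        acc + cpAGo k (idx + 1)
            (PySem.List.slice proc none (some i) ++ [c] ++ PySem.List.slice proc (some i) none) s
          = acc + cpF k ((proc.length : Int) + 1) := by
      intro acc i hi
      rw [ih (idx + 1) _ (by omega) (by omega), hlen i hi]
      norm_cast
    rw [PySem.List.foldl_congr_mem _ _ _ _ hbody,
        PySem.List.foldl_add _ (fun _ => cpF k ((proc.length : Int) + 1)) 0,
        PySem.List.sum_map_const_int, PySem.List.length_pyRange_one]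
    have hcast : ((((proc.length : Int) + 1 - 0).toNat : Int)) = (proc.length : Int) + 1 := by omega
    rw [hcast]
    simp [cpF]

theorem alt_foldl_eq_cpF (k : Nat) (lp : Int) (init : Int) :
    (PySem.List.pyRange 1 ((k : Int) + 1) 1).foldl (fun res j => res * (lp + j)) init
      = init * cpF k lp := by
  induction k generalizing init with
  | zero => simp [PySem.List.pyRange_one_eq_nil, cpF]
  | succ k ih =>
    have : ((k : Int) + 1 + 1) = ((k : Int) + 1) + 1 := by ring
    push_cast
    rw [this, PySem.List.pyRange_one_succ_right (by omega), List.foldl_append]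
    simp only [List.foldl_cons, List.foldl_nil]
    rw [ih, cpF_succ_right]
    ring

-- ===== VERDICT (by name: the statement is the Claim_ definition above) =====
theorem countPermutation_II_spec : Claim_equal_countPermutation_II := by
  intro idx proc s _ hpre
  obtain ⟨h1, h2⟩ := hpre
  unfold Spec_countPermutation_II countPermutation_II countPermutation_II_alt
  set k : Nat := ((s.toList.length : Int) - idx).toNat with hk
  have hki : ((s.toList.length : Int) - idx) = (k : Int) := by omega
  rw [cpAGo_eq_cpF k idx proc.toList s.toList hki h1, hki, alt_foldl_eq_cpF]
  ring
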